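-- pv_equiv track=rewrite | github.com/marcol13/vw-kuka-analysis | src/models/recording.py | cut_record
-- ===== SOURCE A (Python) =====
-- def cut_record(data: list) -> list:
--     prev_frame = data[0]
--     cut_data = []
--
--     start_flag = False
--     end_flag = False
--
--     for frame in data[1:]:
--         if frame['preparation_end'] == 0 and prev_frame['preparation_end'] == 1:
--             start_flag = True
--
--         if start_flag:
--             if frame['wire_cut'] == 1:
--                 end_flag = True
--
--             if end_flag:
--                 break
--
--             cut_data.append(frame)
--         prev_frame = frame
--
--     if not cut_data:
--         return data
--
--     return cut_data
-- ===== SOURCE B (Python) =====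
-- def cut_record(data: list) -> list:
--     n = len(data)
--     start = next((i for i in range(1, n)
--                   if data[i]['preparation_end'] == 0 and data[i - 1]['preparation_end'] == 1),
--                  None)
--     if start is None:
--         return data
--     end = next((j for j in range(start, n) if data[j]['wire_cut'] == 1), n)
--     res = data[start:end]
--     return res if res else data
-- ===== Notes on version B (the rewrite author's own statement) =====
-- stated objective: idiomatic
-- what changed: Replaces A's single stateful loop with start/end flags and an accumulator by two next()-searches (first preparation_end 1->0 transition index, then first wire_cut==1 index from there) and a slice, with the same empty-slice fallback.
import Mathlib
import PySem

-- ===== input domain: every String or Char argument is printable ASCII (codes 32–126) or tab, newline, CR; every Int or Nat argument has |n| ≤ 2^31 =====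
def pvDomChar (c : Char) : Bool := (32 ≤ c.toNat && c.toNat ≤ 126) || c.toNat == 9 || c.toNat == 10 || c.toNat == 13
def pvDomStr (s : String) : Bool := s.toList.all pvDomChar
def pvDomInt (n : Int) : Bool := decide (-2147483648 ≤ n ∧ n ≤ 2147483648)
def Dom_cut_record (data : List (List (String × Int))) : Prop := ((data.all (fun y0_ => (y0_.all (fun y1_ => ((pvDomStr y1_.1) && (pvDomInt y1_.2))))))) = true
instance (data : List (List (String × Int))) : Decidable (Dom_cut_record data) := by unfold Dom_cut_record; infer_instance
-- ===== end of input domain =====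

-- B replaces A's single stateful flag-loop by two searches (first preparation_end 1->0
-- transition, then first wire_cut==1 from there) and a slice; objective: idiomatic, same O(n) cost.

-- frame['preparation_end'] / frame['wire_cut']: dict lookup; a missing key is a Python
-- KeyError, excluded by Pre_cut_record, so the default 0 is never consulted on admitted inputs.
def getPrepEnd (frame : List (String × Int)) : Int :=
  PySem.Dict.getD (PySem.Dict.mk frame) "preparation_end" 0

def getWireCut (frame : List (String × Int)) : Int :=
  PySem.Dict.getD (PySem.Dict.mk frame) "wire_cut" 0

-- ===== PORT A =====
-- the 'for frame in data[1:]' loop with state (prev_frame, cut_data, start_flag);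
-- 'end_flag = True; break' returns cut_data at once (end_flag is never read again).
def cutLoopA (frames : List (List (String × Int))) (prevFrame : List (String × Int))
    (cutData : List (List (String × Int))) (startFlag : Bool) : List (List (String × Int)) :=
  match frames with
  | [] => cutData
  | frame :: rest =>
    let startFlag' := if getPrepEnd frame == 0 && getPrepEnd prevFrame == 1 then true else startFlag
    if startFlag' then
      if getWireCut frame == 1 then
        cutData            -- end_flag = True; break  (before appending)
      else
        cutLoopA rest frame (cutData ++ [frame]) startFlag'
    else
      cutLoopA rest frame cutData startFlag'

def cut_record (data : List (List (String × Int))) : List (List (String × Int)) :=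
  match PySem.List.pyGet? data 0 with   -- prev_frame = data[0]; none = IndexError, excluded by Pre_
  | none => []
  | some prevFrame =>
    let cutData := cutLoopA (PySem.List.slice data (some 1) none) prevFrame [] false
    if cutData = [] then data else cutData

-- ===== PORT B =====
-- two next()-searches over index ranges, then a slice; the '(pyGet? …).getD []' is xs[i] for an
-- index the surrounding pyRange keeps in bounds, so the default is never consulted.
def cut_record_alt (data : List (List (String × Int))) : List (List (String × Int)) :=
  let n : Int := data.length
  let start? := (PySem.List.pyRange 1 n 1).find? (fun i =>
      getPrepEnd ((PySem.List.pyGet? data i).getD []) == 0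
      && getPrepEnd ((PySem.List.pyGet? data (i - 1)).getD []) == 1)
  match start? with
  | none => data
  | some s =>
    let e := ((PySem.List.pyRange s n 1).find? (fun j =>
        getWireCut ((PySem.List.pyGet? data j).getD []) == 1)).getD n
    let res := PySem.List.slice data (some s) (some e)
    if res = [] then data else res

-- ===== PRECONDITION & SPEC =====
-- value-level lookups Pre_ is phrased with (Option: none = the key is missing)
def pePre? (data : List (List (String × Int))) (i : Nat) : Option Int :=
  PySem.Dict.get? (PySem.Dict.mk (data.getD i [])) "preparation_end"

def wcPre? (data : List (List (String × Int))) (i : Nat) : Option Int :=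
  PySem.Dict.get? (PySem.Dict.mk (data.getD i [])) "wire_cut"

-- a preparation_end 1->0 transition at index i (this is where A sets start_flag)
def transAt (data : List (List (String × Int))) (i : Nat) : Prop :=
  pePre? data i = some 0 ∧ pePre? data (i - 1) = some 1

-- a transition happened at or before index i
def startedBy (data : List (List (String × Int))) (i : Nat) : Prop :=
  ∃ s ∈ List.range (i + 1), 1 ≤ s ∧ transAt data s

-- A's break happened strictly before index i (a started frame with wire_cut == 1)
def cutBy (data : List (List (String × Int))) (i : Nat) : Prop :=
  ∃ t ∈ List.range i, 1 ≤ t ∧ startedBy data t ∧ wcPre? data t = some 1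

-- Pre_ is exactly the inputs on which A returns: data nonempty (else IndexError on data[0]),
-- and every frame the loop reaches (index ≥ 1, not after the wire-cut break) has the keys the
-- iteration reads (else KeyError): its own 'preparation_end'; the previous frame's
-- 'preparation_end' when its own value is 0 (the 'and' short-circuits otherwise); and its
-- 'wire_cut' once a transition has started. Frames after the break may lack keys, A never reads them.
def Pre_cut_record (data : List (List (String × Int))) : Prop :=
  data ≠ [] ∧ ∀ i ∈ List.range data.length, 1 ≤ i → ¬ cutBy data i →
    (pePre? data i).isSome = true ∧
    (pePre? data i = some 0 → (pePre? data (i - 1)).isSome = true) ∧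
    (startedBy data i → (wcPre? data i).isSome = true)

instance (data : List (List (String × Int))) : Decidable (Pre_cut_record data) := by
  unfold Pre_cut_record cutBy startedBy transAt pePre? wcPre?; infer_instance

def pvWitness_cut_record : (List (List (String × Int))) :=
  [[("preparation_end", 1), ("wire_cut", 0)], [("preparation_end", 0), ("wire_cut", 0)]]

def Spec_cut_record (data : List (List (String × Int))) (out : List (List (String × Int))) : Prop :=
  out = cut_record_alt data

instance (data : List (List (String × Int))) (out : List (List (String × Int))) :
    Decidable (Spec_cut_record data out) := by unfold Spec_cut_record; infer_instance

-- ===== CLAIM (what is proved, stated in full; the proofs are below) =====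
def Claim_equal_cut_record : Prop := ∀ (data : List (List (String × Int))),
  Dom_cut_record data → Pre_cut_record data → Spec_cut_record data (cut_record data)

-- ===== LEMMAS AND PROOFS =====

-- index (relative to the suffix) of the first 1->0 preparation_end transition
def startIdx? (prev : List (String × Int)) (l : List (List (String × Int))) : Option Nat :=
  match l with
  | [] => none
  | f :: rest =>
    if getPrepEnd f == 0 && getPrepEnd prev == 1 then some 0
    else (startIdx? f rest).map (· + 1)

theorem takeWhile_not_eq_take_findIdx {α : Type} (p : α → Bool) (l : List α) :
    l.takeWhile (fun a => !p a) = l.take (l.findIdx p) := by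
  induction l with
  | nil => rfl
  | cons a t ih =>
    by_cases h : p a <;> simp [List.findIdx_cons, h, ih]

theorem startIdx?_lt_length (l : List (List (String × Int))) :
    ∀ prev k, startIdx? prev l = some k → k < l.length := by
  induction l with
  | nil => intro prev k h; simp [startIdx?] at h
  | cons f rest ih =>
    intro prev k h
    rw [startIdx?] at h
    by_cases hc : (getPrepEnd f == 0 && getPrepEnd prev == 1) = true
    · rw [if_pos hc] at h; cases h; simp
    · rw [if_neg hc] at h
      cases hs : startIdx? f rest with
      | none => rw [hs] at h; simp at h
      | some k' =>
        rw [hs] at h; simp at h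
        have := ih f k' hs
        simp only [List.length_cons]
        omega

theorem cutLoopA_true (frames : List (List (String × Int))) :
    ∀ prev cut, cutLoopA frames prev cut true
      = cut ++ frames.takeWhile (fun f => !(getWireCut f == 1)) := by
  induction frames with
  | nil => intro prev cut; simp [cutLoopA]
  | cons f rest ih =>
    intro prev cut
    rw [cutLoopA]
    simp only [ite_self, if_pos]
    by_cases hw : (getWireCut f == 1) = true
    · simp [hw]
    · simp [hw, ih]

theorem cutLoopA_false_none (frames : List (List (String × Int))) :
    ∀ prev, startIdx? prev frames = none → cutLoopA frames prev [] false = [] := by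
  induction frames with
  | nil => intro prev _; simp [cutLoopA]
  | cons f rest ih =>
    intro prev h
    rw [startIdx?] at h
    rw [cutLoopA]
    by_cases hc : (getPrepEnd f == 0 && getPrepEnd prev == 1) = true
    · rw [if_pos hc] at h; simp at h
    · rw [if_neg hc] at h
      cases hs : startIdx? f rest with
      | none => simp only [hc]; simp only [if_false, Bool.false_eq_true]
                exact ih f hs
      | some k' => rw [hs] at h; simp at h

theorem cutLoopA_false_some (frames : List (List (String × Int))) :
    ∀ prev k, startIdx? prev frames = some k →
      cutLoopA frames prev [] false
        = (frames.drop k).takeWhile (fun f => !(getWireCut f == 1)) := by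
  induction frames with
  | nil => intro prev k h; simp [startIdx?] at h
  | cons f rest ih =>
    intro prev k h
    rw [startIdx?] at h
    rw [cutLoopA]
    by_cases hc : (getPrepEnd f == 0 && getPrepEnd prev == 1) = true
    · rw [if_pos hc] at h
      cases h
      simp only [hc, if_pos, List.drop_zero]
      by_cases hw : (getWireCut f == 1) = true
      · simp [hw]
      · simp [hw, cutLoopA_true]
    · rw [if_neg hc] at h
      cases hs : startIdx? f rest with
      | none => rw [hs] at h; simp at h
      | some k' =>
        rw [hs] at h; simp at h
        subst h
        simp only [hc]
        simp only [Bool.false_eq_true, if_false]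
        rw [ih f k' hs, List.drop_succ_cons]

theorem findWire (data : List (List (String × Int))) :
    ∀ (a : Nat), a ≤ data.length →
      (((PySem.List.pyRange (a : Int) (data.length : Int) 1).find? (fun j =>
          getWireCut ((PySem.List.pyGet? data j).getD []) == 1)).getD (data.length : Int))
      = ((a + (data.drop a).findIdx (fun f => getWireCut f == 1) : Nat) : Int) := by
  intro a ha
  induction hd : data.length - a generalizing a with
  | zero =>
    have hae : a = data.length := by omega
    subst hae
    rw [PySem.List.pyRange_one_eq_nil (le_refl _)]
    simp
  | succ m ih =>
    have hlt : a < data.length := by omega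
    rw [PySem.List.pyRange_one_cons (by exact_mod_cast hlt)]
    rw [List.find?_cons]
    rw [List.drop_eq_getElem_cons hlt]
    have hget : PySem.List.pyGet? data (a : Int) = some data[a] := by
      rw [PySem.List.pyGet?_natCast, List.getElem?_eq_getElem hlt]
    by_cases hw : (getWireCut data[a] == 1) = true
    · have hpred : (getWireCut ((PySem.List.pyGet? data ((a : Nat) : Int)).getD []) == 1) = true := by
        rw [hget]; exact hw
      simp only [hpred, Option.getD_some, List.findIdx_cons, hw, cond_true, Nat.add_zero]
    · simp only [hget, Option.getD_some, hw]
      have hcast : ((a : Int) + 1) = ((a + 1 : Nat) : Int) := by push_cast; ring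
      rw [hcast, ih (a + 1) (by omega) (by omega)]
      rw [List.findIdx_cons]
      simp only [hw, cond_false]
      congr 1
      omega

theorem findStart (data : List (List (String × Int))) :
    ∀ (a : Nat) (prev : List (String × Int)), 1 ≤ a → a ≤ data.length →
      data[a - 1]? = some prev →
      ((PySem.List.pyRange (a : Int) (data.length : Int) 1).find? (fun i =>
          getPrepEnd ((PySem.List.pyGet? data i).getD []) == 0
          && getPrepEnd ((PySem.List.pyGet? data (i - 1)).getD []) == 1))
      = (startIdx? prev (data.drop a)).map (fun k => ((a + k : Nat) : Int)) := by
  intro a prev h1 ha hp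
  induction hd : data.length - a generalizing a prev with
  | zero =>
    have hae : a = data.length := by omega
    subst hae
    rw [PySem.List.pyRange_one_eq_nil (le_refl _)]
    simp [startIdx?]
  | succ m ih =>
    have hlt : a < data.length := by omega
    rw [PySem.List.pyRange_one_cons (by exact_mod_cast hlt)]
    rw [List.find?_cons]
    rw [List.drop_eq_getElem_cons hlt, startIdx?]
    have hget : PySem.List.pyGet? data (a : Int) = some data[a] := by
      rw [PySem.List.pyGet?_natCast, List.getElem?_eq_getElem hlt]
    have hprevcast : ((a : Int) - 1) = ((a - 1 : Nat) : Int) := by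
      have : (1:Nat) ≤ a := h1
      push_cast [this]; ring
    have hgetp : PySem.List.pyGet? data ((a : Int) - 1) = some prev := by
      rw [hprevcast, PySem.List.pyGet?_natCast, hp]
    by_cases hc : (getPrepEnd data[a] == 0 && getPrepEnd prev == 1) = true
    · have hpred : ((getPrepEnd ((PySem.List.pyGet? data ((a : Nat) : Int)).getD []) == 0)
          && (getPrepEnd ((PySem.List.pyGet? data (((a : Nat) : Int) - 1)).getD []) == 1)) = true := by
        rw [hget, hgetp]; exact hc
      simp only [hpred, hc, if_true]
      simp
    · rw [Bool.not_eq_true] at hc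
      have hpred : ((getPrepEnd ((PySem.List.pyGet? data ((a : Nat) : Int)).getD []) == 0)
          && (getPrepEnd ((PySem.List.pyGet? data (((a : Nat) : Int) - 1)).getD []) == 1)) = false := by
        rw [hget, hgetp]; exact hc
      simp only [hpred, hc, Bool.false_eq_true, if_false]
      have hcast : (((a : Nat) : Int) + 1) = ((a + 1 : Nat) : Int) := by push_cast; ring
      rw [hcast, ih (a + 1) data[a] (by omega) (by omega) (by simp) (by omega)]
      cases hs : startIdx? data[a] (data.drop (a + 1)) with
      | none => simp
      | some k =>
        simp only [Option.map_some]
        have : a + 1 + k = a + (k + 1) := by omega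
        rw [this]

theorem main_eq (data : List (List (String × Int))) (hne : data ≠ []) :
    cut_record data = cut_record_alt data := by
  have hl : 0 < data.length := List.length_pos_iff.mpr hne
  have h0 : PySem.List.pyGet? data 0 = some data[0] := by
    rw [PySem.List.pyGet?_zero, List.getElem?_eq_getElem hl]
  have hS := findStart data 1 data[0] (le_refl 1) hl
    (by simp [List.getElem?_eq_getElem hl])
  simp only [Nat.cast_one] at hS
  rw [cut_record, cut_record_alt, h0]
  simp only [PySem.List.slice_from_one, ← List.drop_one, hS]
  cases hs : startIdx? data[0] (data.drop 1) with
  | none =>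
    simp only [Option.map_none]
    rw [cutLoopA_false_none _ _ hs]
    simp
  | some k =>
    simp only [Option.map_some]
    have hk : k < (data.drop 1).length := startIdx?_lt_length _ _ _ hs
    have hk' : 1 + k ≤ data.length := by simp at hk; omega
    rw [cutLoopA_false_some _ _ _ hs]
    have hW := findWire data (1 + k) hk'
    rw [hW]
    rw [PySem.List.slice_natCast]
    have hm : (1 + k + (data.drop (1 + k)).findIdx (fun f => getWireCut f == 1)) - (1 + k)
        = (data.drop (1 + k)).findIdx (fun f => getWireCut f == 1) := by omega
    rw [hm]
    rw [List.drop_drop, takeWhile_not_eq_take_findIdx]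

-- ===== VERDICT (by name: the statement is the Claim_ definition above) =====
theorem cut_record_spec : Claim_equal_cut_record := by
  intro data _ hpre
  unfold Spec_cut_record
  exact main_eq data hpre.1
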